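-- pv_equiv track=rewrite | github.com/bilalakil/challenges | codechef/ltime49/compclub.py | calc_recursive
-- ===== SOURCE A (Python) =====
-- from itertools import zip_longest
--
-- def merge(branches):
--     if len(branches) == 0:
--         return {}
--     if len(branches) == 1:
--         return branches[0]
--
--     res = {}
--     clubs = set().union(*[b.keys() for b in branches])
--
--     for c in clubs:
--         bs = [b[c] for b in branches if c in b]
--
--         if len(bs) == 0:
--             break
--
--         res[c] = list(map(sum, list(zip_longest(*bs, fillvalue=0))))
--
--     return res
--
-- def calc_recursive(n, x, t, v):
--     '''
--     Returns a list of integers.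
--     '''
--
--     counts = [0] * n
--
--     def dfs(i):
--         c, k = v[i]
--
--         if i not in t or 'n' not in t[i]:
--             if k == 0:
--                 counts[i] = 1
--                 return { c: [1] }
--             return {}
--
--         branch = merge([dfs(j) for j in t[i]['n']])
--
--         if k == 0:
--             if c not in branch:
--                 branch[c] = [1]
--             else:
--                 branch[c][0] += 1
--
--             counts[i] = 1
--         elif c in branch and len(branch[c]) >= k:
--             if len(branch[c]) == k:
--                 branch[c].append(0)
--
--             prev = branch[c][k - 1]
--             counts[i] = prev
--             branch[c][k] += prev
--
--         return branch
--
--     dfs(0)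
--
--     return counts
-- ===== SOURCE B (Python) =====
-- from itertools import zip_longest
--
--
-- def merge(branches):
--     # same helper as the original module
--     if len(branches) == 0:
--         return {}
--     if len(branches) == 1:
--         return branches[0]
--
--     res = {}
--     clubs = set().union(*[b.keys() for b in branches])
--
--     for c in clubs:
--         bs = [b[c] for b in branches if c in b]
--
--         if len(bs) == 0:
--             break
--
--         res[c] = list(map(sum, list(zip_longest(*bs, fillvalue=0))))
--
--     return res
--
--
-- def calc_recursive(n, x, t, v):
--     '''
--     Returns a list of integers.
--     '''
--
--     counts = [0] * n
--
--     # explicit iterative post-order instead of recursion: build the visit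
--     # order with a stack, then process nodes in reverse so every child's
--     # result is ready (in a table) before its parent needs it
--     order = []
--     stack = [0]
--     while stack:
--         i = stack.pop()
--         order.append(i)
--         if i in t and 'n' in t[i]:
--             stack.extend(t[i]['n'])
--
--     result = {}
--     for i in reversed(order):
--         c, k = v[i]
--
--         if i not in t or 'n' not in t[i]:
--             if k == 0:
--                 counts[i] = 1
--                 result[i] = {c: [1]}
--             else:
--                 result[i] = {}
--             continue
--
--         branch = dict(merge([result[j] for j in t[i]['n']]))
--
--         if k == 0:
--             if c not in branch:
--                 branch[c] = [1]
--             else: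
--                 branch[c] = [branch[c][0] + 1] + branch[c][1:]
--             counts[i] = 1
--         elif c in branch and len(branch[c]) >= k:
--             lst = list(branch[c])
--             if len(lst) == k:
--                 lst.append(0)
--             prev = lst[k - 1]
--             counts[i] = prev
--             lst[k] += prev
--             branch[c] = lst
--
--         result[i] = branch
--
--     return counts
-- ===== Notes on version B (the rewrite author's own statement) =====
-- stated objective: alternative
-- what changed: Replaces the recursive dfs with an explicit iterative post-order traversal: a stack-driven while-loop builds the visit order, then one reverse pass computes each node's dict from a result table (the merge helper and the per-node k==0/threshold update are kept), so no recursion and no call-stack threading of counts.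
-- outside the precondition, e.g. on calc_recursive(2, 0, {0: {'n': [1, 1]}}, [(3, 0), (3, 0)]): A returns [1, 1], B returns [1, 1]; on calc_recursive(1, 0, {0: {'n': []}}, [(3, -1)]): A returns [0], B returns [0]; on calc_recursive(0, 0, {0: {'n': []}}, [(3, 1)]): A returns [], B returns []
import Mathlib
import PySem

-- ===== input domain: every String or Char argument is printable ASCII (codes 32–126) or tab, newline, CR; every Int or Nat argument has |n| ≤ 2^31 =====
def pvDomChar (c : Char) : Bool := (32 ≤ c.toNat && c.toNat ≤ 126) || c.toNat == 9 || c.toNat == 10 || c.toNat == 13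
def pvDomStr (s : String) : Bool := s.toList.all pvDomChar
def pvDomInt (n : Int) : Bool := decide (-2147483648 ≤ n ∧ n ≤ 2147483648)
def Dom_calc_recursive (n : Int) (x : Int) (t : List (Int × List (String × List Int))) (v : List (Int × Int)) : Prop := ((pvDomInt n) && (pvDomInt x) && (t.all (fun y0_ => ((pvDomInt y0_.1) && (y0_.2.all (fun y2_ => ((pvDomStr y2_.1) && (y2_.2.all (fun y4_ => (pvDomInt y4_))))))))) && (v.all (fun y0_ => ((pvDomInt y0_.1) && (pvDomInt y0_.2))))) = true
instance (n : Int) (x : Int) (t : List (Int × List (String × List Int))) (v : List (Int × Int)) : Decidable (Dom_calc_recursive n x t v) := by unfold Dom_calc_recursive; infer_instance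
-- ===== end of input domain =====

-- B replaces the recursive dfs by an explicit iterative post-order traversal: a stack-driven
-- while-loop builds the visit order, then one reverse pass computes each node's dict (merge
-- kept as in A) into a result table.  Objective: alternative decomposition, same cost.
-- The Python A mutates only its own local lists; the equivalence is about the return value.

-- shared lookup helper: "i in t and 'n' in t[i]" (both Pythons perform this same double lookup)
def childrenOf (t : List (Int × List (String × List Int))) (i : Int) : Option (List Int) :=
  ((PySem.Dict.mk t).get? i).bind (fun d => (PySem.Dict.mk d).get? "n")

-- column sums of zip_longest(*bs, fillvalue=0): fold of padded elementwise addition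
def padAdd : List Int → List Int → List Int
  | [], ys => ys
  | xs, [] => xs
  | x :: xs, y :: ys => (x + y) :: padAdd xs ys

-- the 'for c in clubs' loop of merge, with its (dead) break
def mergeClubs (branches : List (PySem.Dict Int (List Int))) :
    List Int → PySem.Dict Int (List Int) → PySem.Dict Int (List Int)
  | [], res => res
  | c :: cs, res =>
    let bs := branches.filterMap (fun b => b.get? c)   -- [b[c] for b in branches if c in b]
    if bs.length = 0 then res                          -- the 'break' (clubs is the union, so never taken)
    else mergeClubs branches cs (res.insert c (bs.foldl padAdd []))

-- the module helper merge (identical code in Source A and Source B, so shared by both ports)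
def mergeA (branches : List (PySem.Dict Int (List Int))) : PySem.Dict Int (List Int) :=
  match branches with
  | [] => PySem.Dict.empty
  | [b] => b
  | _ => mergeClubs branches (PySem.Set.ofList (branches.flatMap PySem.Dict.keys)) PySem.Dict.empty

-- the per-node k==0 / threshold update (identical code in Source A and Source B); A's in-place list
-- mutations are written as functional updates of the same values (lists are nonempty on Pre_,
-- so branch[c][0] is the head)
def updateNode (ck : Int × Int) (i : Int) (branch : PySem.Dict Int (List Int))
    (counts : List Int) : PySem.Dict Int (List Int) × List Int :=
  if ck.2 = 0 then
    let branch := match branch.get? ck.1 with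
      | none => branch.insert ck.1 [1]
      | some l => branch.insert ck.1 (((PySem.List.pyGet? l 0).getD 0 + 1) :: PySem.List.slice l (some 1) none)
    (branch, (PySem.List.pySet? counts i 1).getD counts)
  else
    match branch.get? ck.1 with
    | some l =>
      if (l.length : Int) ≥ ck.2 then
        let l1 := if (l.length : Int) = ck.2 then l ++ [0] else l      -- .append(0)
        let prev := (PySem.List.pyGet? l1 (ck.2 - 1)).getD 0           -- branch[c][k-1]
        let l2 := (PySem.List.pySet? l1 ck.2
                    (((PySem.List.pyGet? l1 ck.2).getD 0) + prev)).getD l1  -- branch[c][k] += prev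
        (branch.insert ck.1 l2, (PySem.List.pySet? counts i prev).getD counts)
      else (branch, counts)
    | none => (branch, counts)

-- ===== PORT A =====
-- dfs with the counts list threaded through; the fuel only makes the recursion total
-- (on Pre_ the reachable nodes are distinct indices in [-len v, len v), so fuel 2*len v + 2 never runs out)
def dfsA (t : List (Int × List (String × List Int))) (v : List (Int × Int)) :
    Nat → Int → List Int → PySem.Dict Int (List Int) × List Int
  | 0, _, counts => (PySem.Dict.empty, counts)
  | f+1, i, counts =>
    match PySem.List.pyGet? v i with
    | none => (PySem.Dict.empty, counts)               -- v[i]: IndexError, outside Pre_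
    | some ck =>
      match childrenOf t i with
      | none =>
        if ck.2 = 0 then
          (PySem.Dict.empty.insert ck.1 [1], (PySem.List.pySet? counts i 1).getD counts)
        else (PySem.Dict.empty, counts)
      | some ch =>
        let st := ch.foldl (fun (st : List (PySem.Dict Int (List Int)) × List Int) j =>
          let r := dfsA t v f j st.2
          (st.1 ++ [r.1], r.2)) ([], counts)
        updateNode ck i (mergeA st.1) st.2

def calc_recursive (n : Int) (x : Int) (t : List (Int × List (String × List Int))) (v : List (Int × Int)) : List Int :=
  (dfsA t v (2 * v.length + 2) 0 (List.replicate n.toNat 0)).2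

-- ===== PORT B =====
-- the while-loop building the visit order: pop the stack's last element, record it, push its children
def buildOrder (t : List (Int × List (String × List Int))) :
    Nat → List Int → List Int → List Int
  | 0, _, order => order
  | f+1, stack, order =>
    match stack.getLast? with                          -- while stack: i = stack.pop()
    | none => order
    | some i =>
      match childrenOf t i with
      | some ch => buildOrder t f (stack.dropLast ++ ch) (order ++ [i])   -- stack.extend(t[i]['n'])
      | none => buildOrder t f stack.dropLast (order ++ [i])

-- the body of Source B's reverse pass (result table, counts)
def stepB (t : List (Int × List (String × List Int))) (v : List (Int × Int))
    (st : PySem.Dict Int (PySem.Dict Int (List Int)) × List Int) (i : Int) :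
    PySem.Dict Int (PySem.Dict Int (List Int)) × List Int :=
  match PySem.List.pyGet? v i with
  | none => st                                         -- v[i]: IndexError, outside Pre_
  | some ck =>
    match childrenOf t i with
    | none =>
      if ck.2 = 0 then
        (st.1.insert i (PySem.Dict.empty.insert ck.1 [1]), (PySem.List.pySet? st.2 i 1).getD st.2)
      else (st.1.insert i PySem.Dict.empty, st.2)
    | some ch =>
      -- merge([result[j] for j in t[i]['n']]); result[j] is present on Pre_ (children already done)
      let branch := mergeA (ch.map (fun j => (st.1.get? j).getD PySem.Dict.empty))
      let r := updateNode ck i branch st.2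
      (st.1.insert i r.1, r.2)

def calc_recursive_alt (n : Int) (x : Int) (t : List (Int × List (String × List Int))) (v : List (Int × Int)) : List Int :=
  let order := buildOrder t (2 * v.length + 2) [0] []
  (order.reverse.foldl (stepB t v) (PySem.Dict.empty, List.replicate n.toNat 0)).2

-- ===== PRECONDITION & SPEC =====
-- goodT is a DFS well-formedness check of the input shape (it computes neither program's
-- result): every node reachable from 0 is a fresh index (no node is reached twice, so the
-- reachable part is a tree and A's recursion terminates), v[i] exists, counts[i] is writable
-- (-n ≤ i < n), and internal thresholds are non-negative.  Fuel 2*len v + 2 is provably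
-- sufficient: reachable nodes are distinct indices in [-len v, len v).
def goodT (n : Int) (t : List (Int × List (String × List Int))) (v : List (Int × Int)) :
    Nat → Int → List Int → Option (List Int)
  | 0, _, _ => none
  | f+1, i, seen =>
    if i ∈ seen then none
    else
      match PySem.List.pyGet? v i with
      | none => none
      | some ck =>
        match childrenOf t i with
        | none => if ck.2 = 0 ∧ ¬(-n ≤ i ∧ i < n) then none else some (i :: seen)
        | some ch =>
          if 0 ≤ ck.2 ∧ -n ≤ i ∧ i < n then
            ch.reverse.foldl (fun acc c => acc.bind (fun s => goodT n t v f c s)) (some (i :: seen))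
          else none

-- Pre_ restricts to the natural domain of the task (a rooted tree of committees): the part of
-- t reachable from node 0 is a tree of in-range node indices (-len v ≤ i < n ≤ counts range)
-- with non-negative thresholds at internal nodes.  Outside it A either raises (cycles:
-- RecursionError; out-of-range v[i] or counts[i]: IndexError) or returns on malformed inputs
-- (shared/duplicated children, negative thresholds, nodes ≥ n that happen not to be written)
-- whose raising-vs-returning depends on computed list lengths and is not closed-form; B
-- behaves like A there too (see cites).
def Pre_calc_recursive (n : Int) (x : Int) (t : List (Int × List (String × List Int))) (v : List (Int × Int)) : Prop :=
  (goodT n t v (2 * v.length + 2) 0 []).isSome = true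

instance (n : Int) (x : Int) (t : List (Int × List (String × List Int))) (v : List (Int × Int)) : Decidable (Pre_calc_recursive n x t v) := by unfold Pre_calc_recursive; infer_instance

-- a tree with a backward edge (root 0 → node 2 → node 1)
def pvWitness_calc_recursive : Int × Int × (List (Int × List (String × List Int))) × (List (Int × Int)) :=
  (3, 0, [(0, [("n", [2])]), (2, [("n", [1])])], [(5, 0), (5, 0), (5, 1)])

def Spec_calc_recursive (n : Int) (x : Int) (t : List (Int × List (String × List Int))) (v : List (Int × Int)) (out : List Int) : Prop := out = calc_recursive_alt n x t v
instance (n : Int) (x : Int) (t : List (Int × List (String × List Int))) (v : List (Int × Int)) (out : List Int) : Decidable (Spec_calc_recursive n x t v out) := by unfold Spec_calc_recursive; infer_instance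

-- ===== CLAIM (what is proved, stated in full; the proofs are below) =====
def Claim_equal_calc_recursive : Prop := ∀ (n : Int) (x : Int) (t : List (Int × List (String × List Int))) (v : List (Int × Int)), Dom_calc_recursive n x t v → Pre_calc_recursive n x t v → Spec_calc_recursive n x t v (calc_recursive n x t v)

-- ===== LEMMAS AND PROOFS =====

-- the preorder the stack loop produces below node i (children reversed: the stack pops the
-- last-pushed child first)
def preL (t : List (Int × List (String × List Int))) : Nat → Int → List Int
  | 0, _ => []
  | f+1, i =>
    match childrenOf t i with
    | none => [i]
    | some ch => i :: ch.reverse.flatMap (fun c => preL t f c)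

-- abbreviation for goodT's fold over a child list
def goodL (n : Int) (t : List (Int × List (String × List Int))) (v : List (Int × Int))
    (f : Nat) (cs : List Int) (s : List Int) : Option (List Int) :=
  cs.foldl (fun acc c => acc.bind (fun s => goodT n t v f c s)) (some s)

theorem goodL_none (n : Int) (t : List (Int × List (String × List Int))) (v : List (Int × Int))
    (f : Nat) (cs : List Int) :
    cs.foldl (fun acc c => acc.bind (fun s => goodT n t v f c s)) none = none := by
  induction cs with
  | nil => rfl
  | cons c cs ih => simpa using ih

theorem goodL_cons (n : Int) (t : List (Int × List (String × List Int))) (v : List (Int × Int))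
    (f : Nat) (c : Int) (cs : List Int) (s : List Int) :
    goodL n t v f (c :: cs) s =
      match goodT n t v f c s with
      | none => none
      | some s' => goodL n t v f cs s' := by
  cases h : goodT n t v f c s with
  | none => simp [goodL, h, goodL_none]
  | some s' => simp [goodL, h]

theorem goodT_succ (n : Int) (t : List (Int × List (String × List Int))) (v : List (Int × Int))
    (f : Nat) (i : Int) (seen : List Int) :
    goodT n t v (f+1) i seen =
      (if i ∈ seen then none
       else
        match PySem.List.pyGet? v i with
        | none => none
        | some ck =>
          match childrenOf t i with
          | none => if ck.2 = 0 ∧ ¬(-n ≤ i ∧ i < n) then none else some (i :: seen)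
          | some ch =>
            if 0 ≤ ck.2 ∧ -n ≤ i ∧ i < n then goodL n t v f ch.reverse (i :: seen) else none) := by
  rfl

-- range of a valid index
theorem pyGet?_range (v : List (Int × Int)) (i : Int) (ck : Int × Int)
    (h : PySem.List.pyGet? v i = some ck) : -(v.length : Int) ≤ i ∧ i < (v.length : Int) := by
  have h2 : ¬ PySem.List.pyGet? v i = none := by simp [h]
  rw [PySem.List.pyGet?_eq_none_iff] at h2
  simpa [PySem.Raise.InRange, not_or] using h2

-- good nodes start their own preorder
theorem preL_head (n : Int) (t : List (Int × List (String × List Int))) (v : List (Int × Int))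
    (f : Nat) (i : Int) (u u' : List Int) (h : goodT n t v f i u = some u') :
    ∃ rest, preL t f i = i :: rest := by
  cases f with
  | zero => simp [goodT] at h
  | succ g =>
    cases hc : childrenOf t i with
    | none => exact ⟨[], by simp [preL, hc]⟩
    | some ch => exact ⟨ch.reverse.flatMap (fun c => preL t g c), by simp [preL, hc]⟩

-- every child in a successful goodL fold is good for some seen
theorem goodL_good (n : Int) (t : List (Int × List (String × List Int))) (v : List (Int × Int))
    (f : Nat) : ∀ (cs s s' : List Int), goodL n t v f cs s = some s' →
      ∀ c ∈ cs, ∃ u u', goodT n t v f c u = some u' := by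
  intro cs
  induction cs with
  | nil => intro s s' _ c hc; simp at hc
  | cons c cs ih =>
    intro s s' h c' hc'
    rw [goodL_cons] at h
    cases hg : goodT n t v f c s with
    | none => rw [hg] at h; exact absurd h (by simp)
    | some s1 =>
      rw [hg] at h
      rcases List.mem_cons.1 hc' with rfl | hmem
      · exact ⟨s, s1, hg⟩
      · exact ih s1 s' h c' hmem

-- shape of the seen list a successful goodL fold returns (given the goodT shape at fuel f)
theorem goodL_seen (n : Int) (t : List (Int × List (String × List Int))) (v : List (Int × Int))
    (f : Nat)
    (ihT : ∀ (i : Int) (seen s' : List Int), goodT n t v f i seen = some s' →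
      s' = (preL t f i).reverse ++ seen) :
    ∀ (cs s s' : List Int), goodL n t v f cs s = some s' →
      s' = (cs.flatMap (fun c => preL t f c)).reverse ++ s := by
  intro cs
  induction cs with
  | nil => intro s s' h; simp [goodL] at h; simp [h.symm]
  | cons c cs ih =>
    intro s s' h
    rw [goodL_cons] at h
    cases hg : goodT n t v f c s with
    | none => rw [hg] at h; exact absurd h (by simp)
    | some s1 =>
      rw [hg] at h
      have h1 := ihT c s s1 hg
      have h2 := ih s1 s' h
      subst h1 h2
      simp [List.flatMap_cons, List.reverse_append, List.append_assoc]

-- shape of the seen list a successful check returns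
theorem goodT_seen (n : Int) (t : List (Int × List (String × List Int))) (v : List (Int × Int)) :
    ∀ (f : Nat) (i : Int) (seen s' : List Int), goodT n t v f i seen = some s' →
      s' = (preL t f i).reverse ++ seen := by
  intro f
  induction f with
  | zero => intro i seen s' h; simp [goodT] at h
  | succ f ih =>
    intro i seen s' h
    rw [goodT_succ] at h
    by_cases hmem : i ∈ seen
    · simp [hmem] at h
    · simp only [if_neg hmem] at h
      cases hv : PySem.List.pyGet? v i with
      | none => rw [hv] at h; simp at h
      | some ck =>
        rw [hv] at h
        cases hc : childrenOf t i with
        | none =>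
          rw [hc] at h
          by_cases hcond : ck.2 = 0 ∧ ¬(-n ≤ i ∧ i < n)
          · simp [hcond] at h
          · simp only [if_neg hcond] at h
            cases h
            simp [preL, hc]
        | some ch =>
          rw [hc] at h
          by_cases hcond : 0 ≤ ck.2 ∧ -n ≤ i ∧ i < n
          · simp only [if_pos hcond] at h
            have := goodL_seen n t v f ih ch.reverse (i :: seen) s' h
            subst this
            simp [preL, hc, List.append_assoc]
          · simp [hcond] at h

-- freshness / distinctness / range for a goodL fold (given the same facts at fuel f)
theorem goodL_nodup (n : Int) (t : List (Int × List (String × List Int))) (v : List (Int × Int))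
    (f : Nat)
    (ihT : ∀ (i : Int) (seen s' : List Int), goodT n t v f i seen = some s' →
      (preL t f i).Nodup ∧
      ∀ q ∈ preL t f i, q ∉ seen ∧ -(v.length : Int) ≤ q ∧ q < (v.length : Int)) :
    ∀ (cs s s' : List Int), goodL n t v f cs s = some s' →
      (cs.flatMap (fun c => preL t f c)).Nodup ∧
      ∀ q ∈ cs.flatMap (fun c => preL t f c),
        q ∉ s ∧ -(v.length : Int) ≤ q ∧ q < (v.length : Int) := by
  intro cs
  induction cs with
  | nil => intro s s' _; simp
  | cons c cs ih =>
    intro s s' h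
    rw [goodL_cons] at h
    cases hg : goodT n t v f c s with
    | none => rw [hg] at h; exact absurd h (by simp)
    | some s1 =>
      rw [hg] at h
      obtain ⟨hnd1, hfr1⟩ := ihT c s s1 hg
      obtain ⟨hnd2, hfr2⟩ := ih s1 s' h
      have hs1 : s1 = (preL t f c).reverse ++ s := goodT_seen n t v f c s s1 hg
      subst hs1
      have hfr2' : ∀ q ∈ cs.flatMap (fun c => preL t f c),
          q ∉ preL t f c ∧ q ∉ s ∧ -(v.length : Int) ≤ q ∧ q < (v.length : Int) := by
        intro q hq
        obtain ⟨hq1, hq2⟩ := hfr2 q hq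
        simp only [List.mem_append, List.mem_reverse, not_or] at hq1
        exact ⟨hq1.1, hq1.2, hq2⟩
      constructor
      · rw [List.flatMap_cons]
        refine List.Nodup.append hnd1 hnd2 ?_
        intro a ha hb
        exact (hfr2' a hb).1 ha
      · intro q hq
        rw [List.flatMap_cons, List.mem_append] at hq
        rcases hq with hq | hq
        · exact hfr1 q hq
        · exact ⟨(hfr2' q hq).2.1, (hfr2' q hq).2.2⟩

-- freshness / distinctness / range of the nodes below a good node
theorem goodT_nodup (n : Int) (t : List (Int × List (String × List Int))) (v : List (Int × Int)) :
    ∀ (f : Nat) (i : Int) (seen s' : List Int), goodT n t v f i seen = some s' →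
      (preL t f i).Nodup ∧
      ∀ q ∈ preL t f i, q ∉ seen ∧ -(v.length : Int) ≤ q ∧ q < (v.length : Int) := by
  intro f
  induction f with
  | zero => intro i seen s' h; simp [goodT] at h
  | succ f ih =>
    intro i seen s' h
    rw [goodT_succ] at h
    by_cases hmem : i ∈ seen
    · simp [hmem] at h
    · simp only [if_neg hmem] at h
      cases hv : PySem.List.pyGet? v i with
      | none => rw [hv] at h; simp at h
      | some ck =>
        rw [hv] at h
        have hrange := pyGet?_range v i ck hv
        cases hc : childrenOf t i with
        | none =>
          rw [hc] at h
          by_cases hcond : ck.2 = 0 ∧ ¬(-n ≤ i ∧ i < n)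
          · simp [hcond] at h
          · simp only [if_neg hcond] at h
            cases h
            refine ⟨by simp [preL, hc], ?_⟩
            intro q hq
            simp [preL, hc] at hq
            subst hq
            exact ⟨hmem, hrange⟩
        | some ch =>
          rw [hc] at h
          by_cases hcond : 0 ≤ ck.2 ∧ -n ≤ i ∧ i < n
          · simp only [if_pos hcond] at h
            obtain ⟨hnd, hfr⟩ := goodL_nodup n t v f ih ch.reverse (i :: seen) s' h
            have hfr' : ∀ q ∈ ch.reverse.flatMap (fun c => preL t f c),
                q ≠ i ∧ q ∉ seen ∧ -(v.length : Int) ≤ q ∧ q < (v.length : Int) := by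
              intro q hq
              obtain ⟨hq1, hq2⟩ := hfr q hq
              simp only [List.mem_cons, not_or] at hq1
              exact ⟨hq1.1, hq1.2, hq2⟩
            constructor
            · simp only [preL, hc]
              refine List.Nodup.cons ?_ hnd
              intro hi
              exact ((hfr' i hi).1) rfl
            · intro q hq
              simp only [preL, hc, List.mem_cons] at hq
              rcases hq with rfl | hq
              · exact ⟨hmem, hrange⟩
              · exact ⟨(hfr' q hq).2.1, (hfr' q hq).2.2⟩
          · simp [hcond] at h

-- fuel monotonicity and stability for a goodL fold (given them at fuel f)
theorem goodL_mono (n : Int) (t : List (Int × List (String × List Int))) (v : List (Int × Int))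
    (f : Nat)
    (ihT : ∀ (i : Int) (seen s' : List Int), goodT n t v f i seen = some s' →
      ∀ g, f ≤ g → goodT n t v g i seen = some s' ∧ preL t g i = preL t f i) :
    ∀ (cs s s' : List Int), goodL n t v f cs s = some s' → ∀ g, f ≤ g →
      goodL n t v g cs s = some s' ∧ ∀ c ∈ cs, preL t g c = preL t f c := by
  intro cs
  induction cs with
  | nil => intro s s' h g _; simp [goodL] at h ⊢; simpa using h
  | cons c cs ih =>
    intro s s' h g hg
    rw [goodL_cons] at h
    cases hgd : goodT n t v f c s with
    | none => rw [hgd] at h; exact absurd h (by simp)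
    | some s1 =>
      rw [hgd] at h
      obtain ⟨hgd', hpre⟩ := ihT c s s1 hgd g hg
      obtain ⟨hrest, hprest⟩ := ih s1 s' h g hg
      refine ⟨by rw [goodL_cons, hgd']; exact hrest, ?_⟩
      intro c' hc'
      rcases List.mem_cons.1 hc' with rfl | hmem
      · exact hpre
      · exact hprest c' hmem

-- fuel monotonicity and stability of the preorder
theorem goodT_mono (n : Int) (t : List (Int × List (String × List Int))) (v : List (Int × Int)) :
    ∀ (f : Nat) (i : Int) (seen s' : List Int), goodT n t v f i seen = some s' →
      ∀ g, f ≤ g → goodT n t v g i seen = some s' ∧ preL t g i = preL t f i := by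
  intro f
  induction f with
  | zero => intro i seen s' h; simp [goodT] at h
  | succ f ih =>
    intro i seen s' h g hg
    obtain ⟨g, rfl⟩ : ∃ g', g = g' + 1 := ⟨g - 1, by omega⟩
    have hfg : f ≤ g := by omega
    rw [goodT_succ] at h
    rw [goodT_succ]
    by_cases hmem : i ∈ seen
    · simp [hmem] at h
    · simp only [if_neg hmem] at h ⊢
      cases hv : PySem.List.pyGet? v i with
      | none => rw [hv] at h; simp at h
      | some ck =>
        simp only [hv] at h ⊢
        cases hc : childrenOf t i with
        | none =>
          simp only [hc] at h ⊢
          exact ⟨h, by simp [preL, hc]⟩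
        | some ch =>
          simp only [hc] at h ⊢
          by_cases hcond : 0 ≤ ck.2 ∧ -n ≤ i ∧ i < n
          · simp only [if_pos hcond] at h ⊢
            obtain ⟨hL, hP⟩ := goodL_mono n t v f ih ch.reverse (i :: seen) s' h g hfg
            refine ⟨hL, ?_⟩
            simp only [preL, hc]
            rw [List.flatMap_congr (fun c hcm => hP c hcm)]
          · simp [hcond] at h

-- the dict component of updateNode does not depend on counts
theorem updateNode_fst (ck : Int × Int) (i : Int) (b : PySem.Dict Int (List Int))
    (c c' : List Int) : (updateNode ck i b c).1 = (updateNode ck i b c').1 := by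
  unfold updateNode
  by_cases h0 : ck.2 = 0
  · simp [h0]
  · simp only [if_neg h0]
    cases hb : b.get? ck.1 with
    | none => rfl
    | some l => by_cases hl : (l.length : Int) ≥ ck.2 <;> simp [hl]

-- characterization of A's child fold, given counts-independence at fuel f
theorem dfsA_foldChar' (t : List (Int × List (String × List Int))) (v : List (Int × Int)) (f : Nat)
    (hL1 : ∀ (i : Int) (c c' : List Int), (dfsA t v f i c).1 = (dfsA t v f i c').1) :
    ∀ (cs : List Int) (l : List (PySem.Dict Int (List Int))) (cnt : List Int),
      (cs.foldl (fun (st : List (PySem.Dict Int (List Int)) × List Int) j =>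
          (st.1 ++ [(dfsA t v f j st.2).1], (dfsA t v f j st.2).2)) (l, cnt)) =
        (l ++ cs.map (fun c => (dfsA t v f c cnt).1),
         cs.foldl (fun cn c => (dfsA t v f c cn).2) cnt) := by
  intro cs
  induction cs with
  | nil => intro l cnt; simp
  | cons c cs ih =>
    intro l cnt
    simp only [List.foldl_cons]
    rw [ih]
    refine congrArg₂ Prod.mk ?_ rfl
    rw [List.map_cons,
      List.map_congr_left (fun c' (_ : c' ∈ cs) => hL1 c' ((dfsA t v f c cnt).2) cnt)]
    simp [List.append_assoc]

-- the dict a dfs call returns does not depend on the counts threaded through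
theorem dfsA_fst_counts (t : List (Int × List (String × List Int))) (v : List (Int × Int)) :
    ∀ (f : Nat) (i : Int) (c c' : List Int), (dfsA t v f i c).1 = (dfsA t v f i c').1 := by
  intro f
  induction f with
  | zero => intro i c c'; rfl
  | succ f ih =>
    intro i c c'
    simp only [dfsA]
    cases hv : PySem.List.pyGet? v i with
    | none => rfl
    | some ck =>
      cases hc : childrenOf t i with
      | none =>
        by_cases h0 : ck.2 = 0 <;> simp [h0]
      | some ch =>
        simp only
        rw [dfsA_foldChar' t v f ih ch [] c, dfsA_foldChar' t v f ih ch [] c']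
        rw [List.map_congr_left (fun j (_ : j ∈ ch) => ih j c c')]
        exact updateNode_fst ck i _ _ _

-- characterization of A's child fold
theorem dfsA_foldChar (t : List (Int × List (String × List Int))) (v : List (Int × Int)) (f : Nat) :
    ∀ (cs : List Int) (l : List (PySem.Dict Int (List Int))) (cnt : List Int),
      (cs.foldl (fun (st : List (PySem.Dict Int (List Int)) × List Int) j =>
          (st.1 ++ [(dfsA t v f j st.2).1], (dfsA t v f j st.2).2)) (l, cnt)) =
        (l ++ cs.map (fun c => (dfsA t v f c cnt).1),
         cs.foldl (fun cn c => (dfsA t v f c cn).2) cnt) :=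
  dfsA_foldChar' t v f (dfsA_fst_counts t v f)

-- unfolding of dfsA at an internal node in terms of the fold characterization
theorem dfsA_node (t : List (Int × List (String × List Int))) (v : List (Int × Int))
    (f : Nat) (i : Int) (cnt : List Int) (ck : Int × Int) (ch : List Int)
    (h1 : PySem.List.pyGet? v i = some ck) (h2 : childrenOf t i = some ch) :
    dfsA t v (f+1) i cnt =
      updateNode ck i (mergeA (ch.map (fun c => (dfsA t v f c cnt).1)))
        (ch.foldl (fun cn c => (dfsA t v f c cn).2) cnt) := by
  simp only [dfsA, h1, h2]
  rw [dfsA_foldChar t v f ch [] cnt]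
  simp

-- the children segment of B's reverse pass, given the simulation at fuel f
theorem simSub (n : Int) (t : List (Int × List (String × List Int))) (v : List (Int × Int)) (f : Nat)
    (ihM : ∀ (i : Int) (seen s' : List Int), goodT n t v f i seen = some s' →
      ∀ (res : PySem.Dict Int (PySem.Dict Int (List Int))) (cnt : List Int),
        ((preL t f i).reverse.foldl (stepB t v) (res, cnt)).2 = (dfsA t v f i cnt).2 ∧
        ((preL t f i).reverse.foldl (stepB t v) (res, cnt)).1.get? i = some (dfsA t v f i cnt).1 ∧
        ∀ q, q ∉ preL t f i →
          ((preL t f i).reverse.foldl (stepB t v) (res, cnt)).1.get? q = res.get? q) :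
    ∀ (cs : List Int),
      (∀ c ∈ cs, ∃ u u', goodT n t v f c u = some u') →
      ((cs.flatMap (fun c => preL t f c)).Nodup) →
      ∀ (res : PySem.Dict Int (PySem.Dict Int (List Int))) (cnt : List Int),
        ((cs.flatMap (fun c => (preL t f c).reverse)).foldl (stepB t v) (res, cnt)).2 =
          cs.foldl (fun cn c => (dfsA t v f c cn).2) cnt ∧
        (∀ q, q ∉ cs.flatMap (fun c => preL t f c) →
          ((cs.flatMap (fun c => (preL t f c).reverse)).foldl (stepB t v) (res, cnt)).1.get? q
            = res.get? q) ∧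
        (∀ c ∈ cs,
          ((cs.flatMap (fun c => (preL t f c).reverse)).foldl (stepB t v) (res, cnt)).1.get? c
            = some (dfsA t v f c cnt).1) := by
  intro cs
  induction cs with
  | nil => intro _ _ res cnt; simp
  | cons c cs ih =>
    intro Hg Hnd res cnt
    obtain ⟨u, u', hgc⟩ := Hg c (List.mem_cons_self)
    obtain ⟨rest, hhead⟩ := preL_head n t v f c u u' hgc
    have hcin : c ∈ preL t f c := by rw [hhead]; exact List.mem_cons_self
    simp only [List.flatMap_cons, List.foldl_append] at *
    obtain ⟨e1, e2, e3⟩ := ihM c u u' hgc res cnt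
    rcases hA : ((preL t f c).reverse.foldl (stepB t v) (res, cnt)) with ⟨R1, cnt1⟩
    rw [hA] at e1 e2 e3
    simp only at e1 e2
    have Hnd' : (cs.flatMap (fun c => preL t f c)).Nodup := Hnd.of_append_right
    have hdisj : ∀ a ∈ preL t f c, a ∉ cs.flatMap (fun c => preL t f c) :=
      fun a ha => List.disjoint_of_nodup_append Hnd ha
    obtain ⟨i1, i2, i3⟩ := ih (fun c' hc' => Hg c' (List.mem_cons_of_mem _ hc')) Hnd' R1 cnt1
    refine ⟨?_, ?_, ?_⟩
    · rw [i1, List.foldl_cons, ← e1]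
    · intro q hq
      simp only [List.mem_append, not_or] at hq
      rw [i2 q hq.2, e3 q hq.1]
    · intro c' hc'
      rcases List.mem_cons.1 hc' with rfl | hmem
      · rw [i2 c' (hdisj c' hcin), e2]
      · rw [i3 c' hmem, e1, dfsA_fst_counts t v f c' _ cnt]

-- ===== the main simulation: B's reverse pass computes exactly A's recursion =====
theorem simMain (n : Int) (t : List (Int × List (String × List Int))) (v : List (Int × Int)) :
    ∀ (f : Nat) (i : Int) (seen s' : List Int), goodT n t v f i seen = some s' →
      ∀ (res : PySem.Dict Int (PySem.Dict Int (List Int))) (cnt : List Int),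
        ((preL t f i).reverse.foldl (stepB t v) (res, cnt)).2 = (dfsA t v f i cnt).2 ∧
        ((preL t f i).reverse.foldl (stepB t v) (res, cnt)).1.get? i = some (dfsA t v f i cnt).1 ∧
        ∀ q, q ∉ preL t f i →
          ((preL t f i).reverse.foldl (stepB t v) (res, cnt)).1.get? q = res.get? q := by
  intro f
  induction f with
  | zero => intro i seen s' h; simp [goodT] at h
  | succ f ih =>
    intro i seen s' h res cnt
    rw [goodT_succ] at h
    by_cases hmem : i ∈ seen
    · simp [hmem] at h
    · simp only [if_neg hmem] at h
      cases hv : PySem.List.pyGet? v i with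
      | none => rw [hv] at h; simp at h
      | some ck =>
        simp only [hv] at h
        cases hc : childrenOf t i with
        | none =>
          simp only [hc] at h
          by_cases hcond : ck.2 = 0 ∧ ¬(-n ≤ i ∧ i < n)
          · simp [hcond] at h
          · have hpre : preL t (f+1) i = [i] := by simp [preL, hc]
            rw [hpre]
            simp only [List.reverse_cons, List.reverse_nil, List.nil_append,
              List.foldl_cons, List.foldl_nil]
            simp only [stepB, dfsA, hv, hc]
            by_cases h0 : ck.2 = 0
            · simp only [if_pos h0]
              refine ⟨by simp, by simp [PySem.Dict.get?_insert_self], ?_⟩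
              intro q hq
              simp at hq
              simp [PySem.Dict.get?_insert_of_ne _ _ hq]
            · simp only [if_neg h0]
              refine ⟨by simp, by simp [PySem.Dict.get?_insert_self], ?_⟩
              intro q hq
              simp at hq
              simp [PySem.Dict.get?_insert_of_ne _ _ hq]
        | some ch =>
          simp only [hc] at h
          by_cases hcond : 0 ≤ ck.2 ∧ -n ≤ i ∧ i < n
          · simp only [if_pos hcond] at h
            have H1 : ∀ c ∈ ch, ∃ u u', goodT n t v f c u = some u' := by
              intro c hcm
              exact goodL_good n t v f ch.reverse (i :: seen) s' h c (List.mem_reverse.2 hcm)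
            have hperm : List.Perm (ch.reverse.flatMap (fun c => preL t f c))
                (ch.flatMap (fun c => preL t f c)) :=
              List.Perm.flatMap (List.reverse_perm ch) (fun a _ => List.Perm.refl _)
            have H2 : (ch.flatMap (fun c => preL t f c)).Nodup :=
              hperm.nodup_iff.1 (goodL_nodup n t v f (goodT_nodup n t v f)
                ch.reverse (i :: seen) s' h).1
            have hpre : preL t (f+1) i = i :: ch.reverse.flatMap (fun c => preL t f c) := by
              simp [preL, hc]
            have hrev : (ch.reverse.flatMap (fun c => preL t f c)).reverse =
                ch.flatMap (fun c => (preL t f c).reverse) := by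
              rw [List.reverse_flatMap, List.reverse_reverse]; rfl
            rw [hpre]
            simp only [List.reverse_cons, hrev, List.foldl_append, List.foldl_cons,
              List.foldl_nil]
            obtain ⟨i1, i2, i3⟩ := simSub n t v f ih ch H1 H2 res cnt
            rcases hA : ((ch.flatMap (fun c => (preL t f c).reverse)).foldl (stepB t v)
                (res, cnt)) with ⟨R1, cnt1⟩
            rw [hA] at i1 i2 i3
            simp only at i1
            have hmapeq : ch.map (fun j => ((R1.get? j).getD PySem.Dict.empty)) =
                ch.map (fun c => (dfsA t v f c cnt).1) :=
              List.map_congr_left (fun c hcm => by rw [i3 c hcm]; rfl)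
            have hnode := dfsA_node t v f i cnt ck ch hv hc
            simp only [stepB, hv, hc, hmapeq, i1, ← hnode]
            refine ⟨by simp, by simp [PySem.Dict.get?_insert_self], ?_⟩
            intro q hq
            simp only [List.mem_cons, not_or] at hq
            have hq2 : q ∉ ch.flatMap (fun c => preL t f c) := by
              intro hqq
              exact hq.2 (hperm.symm.subset hqq)
            rw [PySem.Dict.get?_insert_of_ne _ _ hq.1, i2 q hq2]
          · simp [hcond] at h

-- the stack loop produces the flattened preorders of the stack, right to left
theorem buildOrder_eq (n : Int) (t : List (Int × List (String × List Int))) (v : List (Int × Int))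
    (F : Nat) :
    ∀ (f : Nat) (st acc : List Int),
      (∀ c ∈ st, ∃ u u', goodT n t v F c u = some u') →
      (st.flatMap (preL t F)).length ≤ f →
      buildOrder t f st acc = acc ++ st.reverse.flatMap (preL t F) := by
  intro f
  induction f with
  | zero =>
    intro st acc _ hlen
    have hnil : st.flatMap (preL t F) = [] := List.eq_nil_of_length_eq_zero (by omega)
    have hnil' : st.reverse.flatMap (preL t F) = [] := by
      have hp : List.Perm (st.reverse.flatMap (preL t F)) (st.flatMap (preL t F)) :=
        List.Perm.flatMap (List.reverse_perm st) (fun a _ => List.Perm.refl _)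
      exact List.eq_nil_of_length_eq_zero (by rw [hp.length_eq, hnil]; rfl)
    simp [buildOrder, hnil']
  | succ f ih =>
    intro st acc H1 hlen
    rcases st.eq_nil_or_concat with rfl | ⟨l, i, rfl⟩
    · simp [buildOrder]
    · rw [List.concat_eq_append] at H1 hlen ⊢
      obtain ⟨u, u', hgi⟩ := H1 i (by simp)
      obtain ⟨G, rfl⟩ : ∃ G, F = G + 1 := by
        cases F with
        | zero => simp [goodT] at hgi
        | succ G => exact ⟨G, rfl⟩
      have hperm : ∀ (cs : List Int),
          (cs.reverse.flatMap (preL t (G+1))).length = (cs.flatMap (preL t (G+1))).length :=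
        fun cs => (List.Perm.flatMap (List.reverse_perm cs)
          (fun a _ => List.Perm.refl _)).length_eq
      rw [goodT_succ] at hgi
      by_cases hmem : i ∈ u
      · simp [hmem] at hgi
      · simp only [if_neg hmem] at hgi
        cases hv : PySem.List.pyGet? v i with
        | none => rw [hv] at hgi; simp at hgi
        | some ck =>
          simp only [hv] at hgi
          cases hc : childrenOf t i with
          | none =>
            simp only [hc] at hgi
            have hpre : preL t (G+1) i = [i] := by simp [preL, hc]
            have step : buildOrder t (f+1) (l ++ [i]) acc = buildOrder t f l (acc ++ [i]) := by
              simp [buildOrder, hc]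
            have hlen' : (l.flatMap (preL t (G+1))).length ≤ f := by
              simp only [List.flatMap_append] at hlen
              simp [hpre] at hlen
              simp only [List.length_flatMap]
              omega
            rw [step, ih l (acc ++ [i]) (fun c hcm => H1 c (by simp [hcm])) hlen']
            simp [hpre, List.append_assoc]
          | some ch =>
            simp only [hc] at hgi
            by_cases hcond : 0 ≤ ck.2 ∧ -n ≤ i ∧ i < n
            · simp only [if_pos hcond] at hgi
              have hchg : ∀ c ∈ ch, preL t (G+1) c = preL t G c := by
                intro c hcm
                obtain ⟨uc, uc', hgc⟩ := goodL_good n t v G ch.reverse (i :: u) u' hgi c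
                  (List.mem_reverse.2 hcm)
                exact (goodT_mono n t v G c uc uc' hgc (G+1) (by omega)).2
              have H1ch : ∀ c ∈ ch, ∃ w w', goodT n t v (G+1) c w = some w' := by
                intro c hcm
                obtain ⟨uc, uc', hgc⟩ := goodL_good n t v G ch.reverse (i :: u) u' hgi c
                  (List.mem_reverse.2 hcm)
                exact ⟨uc, uc', (goodT_mono n t v G c uc uc' hgc (G+1) (by omega)).1⟩
              have hpre : preL t (G+1) i = i :: ch.reverse.flatMap (preL t (G+1)) := by
                simp only [preL, hc]
                congr 1
                exact List.flatMap_congr (fun c hcm => (hchg c (List.mem_reverse.1 hcm)).symm)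
              have step : buildOrder t (f+1) (l ++ [i]) acc
                  = buildOrder t f (l ++ ch) (acc ++ [i]) := by
                simp [buildOrder, hc]
              have hlen' : ((l ++ ch).flatMap (preL t (G+1))).length ≤ f := by
                simp only [List.flatMap_append, List.length_append] at hlen ⊢
                have h1 : (List.flatMap (preL t (G+1)) [i]).length
                    = 1 + (ch.flatMap (preL t (G+1))).length := by
                  simp [hpre, hperm ch]
                  omega
                omega
              have H1' : ∀ c ∈ l ++ ch, ∃ w w', goodT n t v (G+1) c w = some w' := by
                intro c hcm
                rcases List.mem_append.1 hcm with hcm | hcm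
                · exact H1 c (by simp [hcm])
                · exact H1ch c hcm
              rw [step, ih (l ++ ch) (acc ++ [i]) H1' hlen']
              simp [hpre, List.append_assoc]
            · simp [hcond] at hgi

-- length bound: the preorder of a good root has at most 2*len v distinct in-range nodes
theorem preL_len_le (n : Int) (t : List (Int × List (String × List Int))) (v : List (Int × Int))
    (f : Nat) (i : Int) (seen s' : List Int) (h : goodT n t v f i seen = some s') :
    (preL t f i).length ≤ 2 * v.length := by
  obtain ⟨hnd, hfr⟩ := goodT_nodup n t v f i seen s' h
  have hsub : (preL t f i).toFinset ⊆ Finset.Ico (-(v.length : Int)) (v.length : Int) := by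
    intro q hq
    rw [List.mem_toFinset] at hq
    exact Finset.mem_Ico.2 ⟨(hfr q hq).2.1, (hfr q hq).2.2⟩
  have hcard := Finset.card_le_card hsub
  rw [List.toFinset_card_of_nodup hnd] at hcard
  rw [Int.card_Ico] at hcard
  omega

theorem calc_eq (n : Int) (x : Int) (t : List (Int × List (String × List Int))) (v : List (Int × Int))
    (hpre : Pre_calc_recursive n x t v) : calc_recursive n x t v = calc_recursive_alt n x t v := by
  unfold Pre_calc_recursive at hpre
  obtain ⟨s0, h0⟩ := Option.isSome_iff_exists.1 hpre
  have hlen0 : (preL t (2 * v.length + 2) 0).length ≤ 2 * v.length :=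
    preL_len_le n t v (2 * v.length + 2) 0 [] s0 h0
  have hord : buildOrder t (2 * v.length + 2) [0] [] = preL t (2 * v.length + 2) 0 := by
    have := buildOrder_eq n t v (2 * v.length + 2) (2 * v.length + 2) [0] []
      (fun c hc => by
        have : c = 0 := by simpa using hc
        exact this ▸ ⟨[], s0, h0⟩)
      (by simpa using by omega)
    simpa using this
  obtain ⟨e1, _, _⟩ := simMain n t v (2 * v.length + 2) 0 [] s0 h0
    PySem.Dict.empty (List.replicate n.toNat 0)
  unfold calc_recursive calc_recursive_alt
  rw [hord]
  exact e1.symm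

-- ===== VERDICT (by name: the statement is the Claim_ definition above) =====
theorem calc_recursive_spec : Claim_equal_calc_recursive := by
  intro n x t v _hdom hpre
  unfold Spec_calc_recursive
  exact calc_eq n x t v hpre
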